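/-
  GENERATED by c/gen_symbols.py from base.sym (the BASE only (the same in every program)) — do not edit; re-run the script when the image is re-linked.

  `Symbols`: one number per symbol of the image. `symbols`: this build. `Symbols.rt`: the runtime's entry points as the
  parameter record of Asan/Runtime.lean. `Symbols.image`: the `Image` for given file bytes.
-/
import Asan.Runtime
namespace ProgX.Base

/-- The symbols of the image (`nm`): functions, named objects, section marks. -/
structure Symbols where
  /-- `__text_start`: function -/
  text_start : Nat
  /-- `_start`: function, 89 bytes -/
  start : Nat
  /-- `prog_exit`: function -/
  prog_exit : Nat
  /-- `__asan_report`: function, 64 bytes -/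
  asan_report : Nat
  /-- `prog_reported`: function -/
  prog_reported : Nat
  /-- `range_bad`: function (static), 105 bytes -/
  range_bad : Nat
  /-- `__asan_load1_noabort`: function, 56 bytes -/
  asan_load1_noabort : Nat
  /-- `__asan_store1_noabort`: function, 56 bytes -/
  asan_store1_noabort : Nat
  /-- `__asan_load2_noabort`: function, 79 bytes -/
  asan_load2_noabort : Nat
  /-- `__asan_store2_noabort`: function, 79 bytes -/
  asan_store2_noabort : Nat
  /-- `__asan_load4_noabort`: function, 79 bytes -/
  asan_load4_noabort : Nat
  /-- `__asan_store4_noabort`: function, 79 bytes -/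
  asan_store4_noabort : Nat
  /-- `__asan_load8_noabort`: function, 79 bytes -/
  asan_load8_noabort : Nat
  /-- `__asan_store8_noabort`: function, 79 bytes -/
  asan_store8_noabort : Nat
  /-- `__asan_load16_noabort`: function, 38 bytes -/
  asan_load16_noabort : Nat
  /-- `__asan_store16_noabort`: function, 38 bytes -/
  asan_store16_noabort : Nat
  /-- `__asan_storeN_noabort`: function, 50 bytes -/
  asan_storeN_noabort : Nat
  /-- `arena_unpoison`: function, 40 bytes -/
  arena_unpoison : Nat
  /-- `arena_poison`: function, 27 bytes -/
  arena_poison : Nat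
  /-- `__asan_register_globals`: function, 97 bytes -/
  asan_register_globals : Nat
  /-- `run_ctors`: function, 25 bytes -/
  run_ctors : Nat
  /-- `__asan_loadN_noabort`: function, 50 bytes -/
  asan_loadN_noabort : Nat
  /-- `__asan_handle_no_return`: function, 1 bytes -/
  asan_handle_no_return : Nat
  /-- `__asan_unregister_globals`: function, 1 bytes -/
  asan_unregister_globals : Nat
  /-- `swap_bytes`: function (static), 102 bytes -/
  swap_bytes : Nat
  /-- `sift_down`: function (static), 156 bytes -/
  sift_down : Nat
  /-- `memcpy`: function, 91 bytes -/
  memcpy : Nat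
  /-- `memset`: function, 61 bytes -/
  memset : Nat
  /-- `memcmp`: function, 109 bytes -/
  memcmp : Nat
  /-- `abs`: function, 11 bytes -/
  abs : Nat
  /-- `qsort`: function, 131 bytes -/
  qsort : Nat
  /-- `two_to`: function (static), 16 bytes -/
  two_to : Nat
  /-- `pow_int`: function (static), 37 bytes -/
  pow_int : Nat
  /-- `sin_poly`: function (static), 225 bytes -/
  sin_poly : Nat
  /-- `cos_poly`: function (static), 221 bytes -/
  cos_poly : Nat
  /-- `ldexp`: function, 186 bytes -/
  ldexp : Nat
  /-- `floor`: function, 62 bytes -/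
  floor : Nat
  /-- `sincos_quadrant`: function (static), 190 bytes -/
  sincos_quadrant : Nat
  /-- `exp`: function, 420 bytes -/
  exp : Nat
  /-- `log`: function, 443 bytes -/
  log : Nat
  /-- `pow`: function, 136 bytes -/
  pow : Nat
  /-- `sin`: function, 11 bytes -/
  sin : Nat
  /-- `cos`: function, 11 bytes -/
  cos : Nat
  /-- `malloc`: function, 37 bytes -/
  malloc : Nat
  /-- `calloc`: function, 74 bytes -/
  calloc : Nat
  /-- `free`: function, 36 bytes -/
  free : Nat
  /-- `realloc`: function, 187 bytes -/
  realloc : Nat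
  /-- `reallocarray`: function, 55 bytes -/
  reallocarray : Nat
  /-- `heap_alloc`: function (static), 94 bytes -/
  heap_alloc : Nat
  /-- `heap_live_size`: function (static), 117 bytes -/
  heap_live_size : Nat
  /-- `heap_product_ok`: function (static), 58 bytes -/
  heap_product_ok : Nat
  /-- `__base_text_end`: constant of the link script (the same in every image) -/
  base_text_end : Nat
  /-- `prog_main`: constant of the link script (the same in every image) -/
  prog_main : Nat
  /-- `__base_data_start`: constant of the link script (the same in every image) -/
  base_data_start : Nat
  /-- `__text_cap`: constant of the link script (the same in every image) -/
  text_cap : Nat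
  /-- `__base_data_end`: constant of the link script (the same in every image) -/
  base_data_end : Nat
  /-- `__init_array_start`: constant of the link script (the same in every image) -/
  init_array_start : Nat
  /-- `__init_array_end`: constant of the link script (the same in every image) -/
  init_array_end : Nat

/-- The addresses of this build (base.sym). -/
def symbols : Symbols where
  text_start := 0x100000
  start := 0x100000
  prog_exit := 0x100056
  asan_report := 0x100059
  prog_reported := 0x100096
  range_bad := 0x100200
  asan_load1_noabort := 0x100300
  asan_store1_noabort := 0x1003c0
  asan_load2_noabort := 0x100480
  asan_store2_noabort := 0x100560
  asan_load4_noabort := 0x100640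
  asan_store4_noabort := 0x100720
  asan_load8_noabort := 0x100800
  asan_store8_noabort := 0x1008e0
  asan_load16_noabort := 0x1009c0
  asan_store16_noabort := 0x100a80
  asan_storeN_noabort := 0x100b40
  arena_unpoison := 0x100c00
  arena_poison := 0x100cc0
  asan_register_globals := 0x100d60
  run_ctors := 0x100e60
  asan_loadN_noabort := 0x100f00
  asan_handle_no_return := 0x100fc0
  asan_unregister_globals := 0x101060
  swap_bytes := 0x101200
  sift_down := 0x101300
  memcpy := 0x101440
  memset := 0x101520
  memcmp := 0x1015e0
  abs := 0x1016e0
  qsort := 0x1018c0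
  two_to := 0x101d00
  pow_int := 0x101da0
  sin_poly := 0x101e60
  cos_poly := 0x102040
  ldexp := 0x102200
  floor := 0x102380
  sincos_quadrant := 0x102440
  exp := 0x1025c0
  log := 0x102920
  pow := 0x102ca0
  sin := 0x102dc0
  cos := 0x102e60
  malloc := 0x103200
  calloc := 0x103500
  free := 0x103800
  realloc := 0x103b00
  reallocarray := 0x103e00
  heap_alloc := 0x104100
  heap_live_size := 0x104200
  heap_product_ok := 0x104300
  base_text_end := 0x105000
  prog_main := 0x105000
  base_data_start := 0x140000
  text_cap := 0x140000
  base_data_end := 0x141000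
  init_array_start := 0x141000
  init_array_end := 0x141008

/-- The runtime's entry points, for the contracts of Asan/Runtime.lean. -/
def Symbols.rt (S : Symbols) (ctor : X86.Word) : Asan.RtSymbols where
  report := UInt64.ofNat S.asan_report
  rangeBad := UInt64.ofNat S.range_bad
  load1 := UInt64.ofNat S.asan_load1_noabort
  store1 := UInt64.ofNat S.asan_store1_noabort
  load2 := UInt64.ofNat S.asan_load2_noabort
  store2 := UInt64.ofNat S.asan_store2_noabort
  load4 := UInt64.ofNat S.asan_load4_noabort
  store4 := UInt64.ofNat S.asan_store4_noabort
  load8 := UInt64.ofNat S.asan_load8_noabort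
  store8 := UInt64.ofNat S.asan_store8_noabort
  load16 := UInt64.ofNat S.asan_load16_noabort
  store16 := UInt64.ofNat S.asan_store16_noabort
  storeN := UInt64.ofNat S.asan_storeN_noabort
  arenaUnpoison := UInt64.ofNat S.arena_unpoison
  arenaPoison := UInt64.ofNat S.arena_poison
  registerGlobals := UInt64.ofNat S.asan_register_globals
  ctor := ctor
  runCtors := UInt64.ofNat S.run_ctors
  initArrayStart := S.init_array_start
  initArrayEnd := S.init_array_end

end ProgX.Base
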